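-- pv_equiv track=rewrite | github.com/manaswiniyelagandula/YAHTZEE-Game | YAHTZEE.py | Same_kind
-- ===== SOURCE A (Python) =====
-- def Same_kind(dice):
--     freq = {}
--     for i in dice:
--         if i in freq:
--             freq[i] += 1
--         else:
--             freq[i] = 1
--     return freq
-- ===== SOURCE B (Python) =====
-- def Same_kind(dice):
--     return {v: dice.count(v) for v in dict.fromkeys(dice)}
-- ===== Notes on version B (the rewrite author's own statement) =====
-- stated objective: idiomatic
-- what changed: Replaces the incremental one-pass dict accumulation with a build-distinct-keys-then-rescan strategy: dict.fromkeys(dice) gives the distinct values in first-appearance order, and a dict comprehension counts each with dice.count(v).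
import Mathlib
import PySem

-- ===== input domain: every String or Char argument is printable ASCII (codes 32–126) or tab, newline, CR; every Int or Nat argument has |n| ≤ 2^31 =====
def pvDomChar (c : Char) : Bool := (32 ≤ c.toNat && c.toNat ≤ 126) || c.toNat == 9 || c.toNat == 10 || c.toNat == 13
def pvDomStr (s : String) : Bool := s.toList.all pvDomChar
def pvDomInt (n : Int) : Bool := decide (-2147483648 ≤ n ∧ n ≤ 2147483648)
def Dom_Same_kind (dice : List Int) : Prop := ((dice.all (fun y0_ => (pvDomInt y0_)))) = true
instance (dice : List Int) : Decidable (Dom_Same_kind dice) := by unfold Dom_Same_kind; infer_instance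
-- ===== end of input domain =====

-- B replaces A's incremental dict accumulation with distinct-keys-then-count-per-key (idiomatic, same result).

-- ===== PORT A =====
def Same_kind (dice : List Int) : List (Int × Int) :=
  (dice.foldl
    (fun freq i =>
      if freq.contains i then freq.insert i (freq.getD i 0 + 1)
      else freq.insert i 1)
    PySem.Dict.empty).items

-- ===== PORT B =====
def Same_kind_alt (dice : List Int) : List (Int × Int) :=
  (PySem.List.dedup dice).map (fun v => (v, (dice.count v : Int)))

-- ===== PRECONDITION & SPEC =====
def Spec_Same_kind (dice : List Int) (out : List (Int × Int)) : Prop := out = Same_kind_alt dice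
instance (dice : List Int) (out : List (Int × Int)) : Decidable (Spec_Same_kind dice out) := by unfold Spec_Same_kind; infer_instance

-- ===== CLAIM (what is proved, stated in full; the proofs are below) =====
def Claim_equal_Same_kind : Prop := ∀ (dice : List Int), Dom_Same_kind dice → Spec_Same_kind dice (Same_kind dice)

-- ===== LEMMAS AND PROOFS =====

-- A's loop body (`if i in freq` branch) is pointwise the counter step: when the key is absent, getD is 0.
theorem sameKind_step_eq (freq : PySem.Dict Int Int) (i : Int) :
    (if freq.contains i then freq.insert i (freq.getD i 0 + 1) else freq.insert i 1)
      = freq.insert i (freq.getD i 0 + 1) := by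
  by_cases h : freq.contains i = true
  · simp [h]
  · simp only [Bool.not_eq_true] at h
    rw [PySem.Dict.getD_of_not_contains (h := h)]
    simp [h]

-- ===== VERDICT (by name: the statement is the Claim_ definition above) =====
theorem Same_kind_spec : Claim_equal_Same_kind := by
  intro dice _
  unfold Spec_Same_kind Same_kind Same_kind_alt
  have hfun : (fun (freq : PySem.Dict Int Int) (i : Int) =>
      if freq.contains i then freq.insert i (freq.getD i 0 + 1) else freq.insert i 1)
      = fun freq i => freq.insert i (freq.getD i 0 + 1) := by
    funext freq i; exact sameKind_step_eq freq i
  rw [hfun, PySem.Dict.foldl_insert_getD_add_one_eq_counter, PySem.Dict.items_counter,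
    PySem.List.dedup_eq_ofList]
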